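-- pv_equiv track=rewrite | github.com/alexwhb/IMDBspider | tutorial/pipelines.py | clean_money
-- ===== SOURCE A (Python) =====
-- def clean_money(string):
--     # you could add more symbols to this, but it gets kinda complex with some of the symbles being unicode,
--     # so I sipped that for now.
--     currency_symbols = "$"
--     clean_money_string = ""
--     stop_adding = False
--     for index, char in enumerate(list(string)):
--         if char in currency_symbols and not stop_adding:
--             clean_money_string += char
--         elif char == "," and not stop_adding:
--             clean_money_string += char
--         elif char.isdigit() and not stop_adding:
--             clean_money_string += char
--         elif char in ' ':
--             # we know that numbers do not have spaces in them, so we can assume that once the number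
--             # has started there will be no spaces
--             if len(clean_money_string) > 0:
--                 stop_adding = True
--
--     return clean_money_string
-- ===== SOURCE B (Python) =====
-- def clean_money(string):
--     for token in string.split(' '):
--         filtered = ''.join(c for c in token if c == '$' or c == ',' or c.isdigit())
--         if filtered:
--             return filtered
--     return ''
-- ===== Notes on version B (the rewrite author's own statement) =====
-- stated objective: simpler
-- what changed: Replaced A's single character scan with a mutable stop_adding flag by splitting the string on ' ' and returning the '$'/','/digit-filtered form of the first token whose filtered form is non-empty.
import Mathlib
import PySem

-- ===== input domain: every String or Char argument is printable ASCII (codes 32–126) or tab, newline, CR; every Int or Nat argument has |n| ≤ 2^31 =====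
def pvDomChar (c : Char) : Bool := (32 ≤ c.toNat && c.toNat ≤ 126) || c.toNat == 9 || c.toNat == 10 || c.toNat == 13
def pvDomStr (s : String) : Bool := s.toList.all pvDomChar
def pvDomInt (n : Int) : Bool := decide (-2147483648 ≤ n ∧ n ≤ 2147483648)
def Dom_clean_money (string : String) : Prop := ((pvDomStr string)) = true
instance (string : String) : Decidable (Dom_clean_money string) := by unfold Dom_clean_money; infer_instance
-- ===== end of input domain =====

-- B: instead of A's single stateful scan with a stop flag, split on ' ' and return the
-- filtered form of the first token whose filtering is non-empty (objective: simpler).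

-- ===== PORT A =====
-- one step of A's for-loop; state = (clean_money_string, stop_adding); the index from
-- enumerate is carried but unused, as in the Python
def cmStep (st : List Char × Bool) (ic : Int × Char) : List Char × Bool :=
  let c := ic.2
  -- `char in "$"` for a single char is equality with '$' (exact)
  if c == '$' && !st.2 then (st.1 ++ [c], st.2)
  else if c == ',' && !st.2 then (st.1 ++ [c], st.2)
  else if PySem.Chars.isdigit c && !st.2 then (st.1 ++ [c], st.2)
  else if c == ' ' then (if st.1.length > 0 then (st.1, true) else st)
  else st

def clean_money (string : String) : String :=
  String.mk ((PySem.List.enumerate string.toList 0).foldl cmStep ([], false)).1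

-- ===== PORT B =====
def cmAllowed (c : Char) : Bool := c == '$' || c == ',' || PySem.Chars.isdigit c

-- the for-loop of B over the tokens, with its early return
def cmFirst : List (List Char) → List Char
  | [] => []
  | t :: ts => let f := t.filter cmAllowed; if f = [] then cmFirst ts else f

def clean_money_alt (string : String) : String :=
  String.mk (cmFirst (PySem.Chars.splitOn string.toList [' ']))

-- ===== PRECONDITION & SPEC =====
def Spec_clean_money (string : String) (out : String) : Prop := out = clean_money_alt string
instance (string : String) (out : String) : Decidable (Spec_clean_money string out) := by unfold Spec_clean_money; infer_instance

-- ===== CLAIM (what is proved, stated in full; the proofs are below) =====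
def Claim_equal_clean_money : Prop := ∀ (string : String), Dom_clean_money string → Spec_clean_money string (clean_money string)

-- ===== LEMMAS AND PROOFS =====

-- structural description of split(' ') on char lists (proved against PySem.Chars.splitOn below)
def cmSplit : List Char → List (List Char)
  | [] => [[]]
  | c :: cs => if c = ' ' then [] :: cmSplit cs else (cmSplit cs).modifyHead (c :: ·)

lemma cmSplit_ne_nil (cs : List Char) : cmSplit cs ≠ [] := by
  cases cs with
  | nil => simp [cmSplit]
  | cons c cs =>
    simp only [cmSplit]
    split
    · simp
    · cases h : cmSplit cs with
      | nil => exact absurd h (cmSplit_ne_nil cs)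
      | cons t ts => simp

lemma splitOn_go_eq (fuel : Nat) : ∀ (l cur : List Char) (acc : List (List Char)),
    l.length ≤ fuel →
    PySem.Chars.splitOn.go [' '] fuel l cur acc
      = acc.reverse ++ (cmSplit l).modifyHead (cur.reverse ++ ·) := by
  induction fuel with
  | zero =>
    intro l cur acc h
    have hl : l = [] := List.length_eq_zero_iff.mp (Nat.le_zero.mp h)
    subst hl
    simp [PySem.Chars.splitOn.go, cmSplit]
  | succ fuel ih =>
    intro l cur acc h
    cases l with
    | nil => simp [PySem.Chars.splitOn.go, cmSplit]
    | cons c rest =>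
      by_cases hc : c = ' '
      · subst hc
        have hgo : PySem.Chars.splitOn.go [' '] (fuel + 1) (' ' :: rest) cur acc
            = PySem.Chars.splitOn.go [' '] fuel rest [] (cur.reverse :: acc) := by
          simp [PySem.Chars.splitOn.go, List.isPrefixOf]
        rw [hgo, ih rest [] (cur.reverse :: acc) (by simpa using h)]
        simp only [cmSplit]
        cases cmSplit rest <;> simp
      · have hgo : PySem.Chars.splitOn.go [' '] (fuel + 1) (c :: rest) cur acc
            = PySem.Chars.splitOn.go [' '] fuel rest (c :: cur) acc := by
          simp [PySem.Chars.splitOn.go, List.isPrefixOf, Ne.symm hc]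
        rw [hgo, ih rest (c :: cur) acc (by simpa using Nat.lt_succ_iff.mp (by simpa using h))]
        simp only [cmSplit, if_neg hc]
        cases hsp : cmSplit rest with
        | nil => exact absurd hsp (cmSplit_ne_nil rest)
        | cons t ts => simp

lemma splitOn_eq_cmSplit (cs : List Char) :
    PySem.Chars.splitOn cs [' '] = cmSplit cs := by
  rw [PySem.Chars.splitOn, splitOn_go_eq (cs.length + 1) cs [] [] (by omega)]
  cases cmSplit cs <;> simp

lemma cmAllowed_ne_space {c : Char} (h : cmAllowed c = true) : c ≠ ' ' := by
  intro hc; subst hc; simp [cmAllowed, PySem.Chars.isdigit] at h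

-- the head of split(' ') is the prefix up to the first space
lemma cmSplit_head (cs t : List Char) (ts : List (List Char)) (h : cmSplit cs = t :: ts) :
    t = cs.takeWhile (· ≠ ' ') := by
  induction cs generalizing t ts with
  | nil =>
    simp only [cmSplit] at h
    injection h with h1 _
    simp [← h1]
  | cons c cs ihc =>
    by_cases hc : c = ' '
    · subst hc
      simp only [cmSplit] at h
      injection h with h1 _
      simp [← h1]
    · simp only [cmSplit, if_neg hc] at h
      cases h2 : cmSplit cs with
      | nil => exact absurd h2 (cmSplit_ne_nil cs)
      | cons t' ts' =>
        rw [h2, List.modifyHead_cons] at h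
        injection h with h1 _
        simp [← h1, hc, ihc t' ts' h2]

-- the four shapes of one loop step of A
lemma cmStep_append (acc : List Char) (p : Int × Char) (h : cmAllowed p.2 = true) :
    cmStep (acc, false) p = (acc ++ [p.2], false) := by
  by_cases h1 : p.2 == '$' <;> by_cases h2 : p.2 == ',' <;>
    by_cases h3 : PySem.Chars.isdigit p.2 <;> simp_all [cmStep, cmAllowed]

lemma cmStep_space (acc : List Char) (p : Int × Char) (hs : p.2 = ' ') (hacc : acc ≠ []) :
    cmStep (acc, false) p = (acc, true) := by
  simp [cmStep, hs, show ((' ' == '$') = false) from by decide,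
    show ((' ' == ',') = false) from by decide,
    show (PySem.Chars.isdigit ' ' = false) from by decide, List.length_pos_iff, hacc]

lemma cmStep_space_empty (p : Int × Char) (hs : p.2 = ' ') :
    cmStep ([], false) p = ([], false) := by
  simp [cmStep, hs, show ((' ' == '$') = false) from by decide,
    show ((' ' == ',') = false) from by decide,
    show (PySem.Chars.isdigit ' ' = false) from by decide]

lemma cmStep_skip (acc : List Char) (p : Int × Char) (ha : cmAllowed p.2 = false)
    (hs : p.2 ≠ ' ') : cmStep (acc, false) p = (acc, false) := by
  simp only [cmAllowed, Bool.or_eq_false_iff] at ha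
  simp [cmStep, ha.1.1, ha.1.2, ha.2, hs]

lemma cmStep_stopped (acc : List Char) (p : Int × Char) :
    cmStep (acc, true) p = (acc, true) := by
  simp only [cmStep]
  split_ifs <;> simp_all

-- once stop_adding is true the loop state never changes
lemma foldl_cmStep_stopped (l : List (Int × Char)) (acc : List Char) :
    l.foldl cmStep (acc, true) = (acc, true) := by
  induction l with
  | nil => rfl
  | cons p l ih => rw [List.foldl_cons, cmStep_stopped, ih]

-- a running loop with a non-empty accumulator collects the allowed chars up to the next space
lemma foldl_cmStep_running (l : List (Int × Char)) (acc : List Char) (hacc : acc ≠ []) :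
    (l.foldl cmStep (acc, false)).1
      = acc ++ ((l.map (·.2)).takeWhile (· ≠ ' ')).filter cmAllowed := by
  induction l generalizing acc with
  | nil => simp
  | cons p l ih =>
    by_cases ha : cmAllowed p.2 = true
    · rw [List.foldl_cons, cmStep_append acc p ha, ih (acc ++ [p.2]) (by simp)]
      simp [cmAllowed_ne_space ha, ha]
    · by_cases hsp : p.2 = ' '
      · rw [List.foldl_cons, cmStep_space acc p hsp hacc, foldl_cmStep_stopped]
        simp [hsp]
      · rw [List.foldl_cons, cmStep_skip acc p (by simpa using ha) hsp, ih acc hacc]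
        simp [hsp, ha]

-- the loop from the empty accumulator computes B's token scan
lemma foldl_cmStep_empty (l : List (Int × Char)) :
    (l.foldl cmStep ([], false)).1 = cmFirst (cmSplit (l.map (·.2))) := by
  induction l with
  | nil => simp [cmSplit, cmFirst]
  | cons p l ih =>
    by_cases ha : cmAllowed p.2 = true
    · rw [List.foldl_cons, cmStep_append [] p ha]
      simp only [List.nil_append]
      rw [foldl_cmStep_running l [p.2] (by simp)]
      simp only [List.map_cons, cmSplit, if_neg (cmAllowed_ne_space ha)]
      cases hsp : cmSplit (l.map (·.2)) with
      | nil => exact absurd hsp (cmSplit_ne_nil _)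
      | cons t ts =>
        rw [cmSplit_head _ t ts hsp]
        simp [cmFirst, ha]
    · by_cases hsp : p.2 = ' '
      · rw [List.foldl_cons, cmStep_space_empty p hsp, ih]
        simp [cmSplit, hsp, cmFirst]
      · rw [List.foldl_cons, cmStep_skip [] p (by simpa using ha) hsp, ih]
        simp only [List.map_cons, cmSplit, if_neg hsp]
        cases hsp2 : cmSplit (l.map (·.2)) with
        | nil => exact absurd hsp2 (cmSplit_ne_nil _)
        | cons t ts => simp [cmFirst, List.filter_cons, ha]

-- ===== VERDICT (by name: the statement is the Claim_ definition above) =====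
theorem clean_money_spec : Claim_equal_clean_money := by
  intro s _
  unfold Spec_clean_money clean_money clean_money_alt
  rw [splitOn_eq_cmSplit]
  have h := foldl_cmStep_empty (PySem.List.enumerate s.toList 0)
  rw [PySem.List.map_snd_enumerate] at h
  rw [h]
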